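-- pv_equiv track=rewrite | github.com/WanLingLin595/Matroidal-Connectivity | BCube.py | servers
-- ===== SOURCE A (Python) =====
-- def ten2x(n, x, l): # n: a decimal number    x: x-bit    l: the length of string
--     a = ['0','1','2','3','4','5','6','7','8','9','A','B','C','D','E','F','G','H','I','J','K','L','M','N','O','P','Q','R','S','T','U','V']
--     b = []
--     while True:
--         s = n // x
--         y = n % x
--         b = b + [y]
--         if s == 0:
--             break
--         n = s
--     nt = []
--     for i in b:
--         nt.append(a[i])
--     for i in range(l-len(nt)):
--         nt.append('0')
--     nt.reverse()
--     return "".join(nt)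
--
-- def servers(n, k):
--     if k == 1:
--         address_s = []   # record the address of each server
--         for i in range(n):
--             v = []
--             for j in range(n):
--                 vertex = ten2x(i, n, 1) + ten2x(j, n, 1) + 'a'
--                 v.append(vertex)
--             address_s.append(v)
--         return address_s
--     else:
--         v = []
--         for i in range(n):   #  Based on BCube(n,1)
--             x = []
--             for j in range(n):
--                 vertex = ten2x(i, n, 1) + ten2x(j, n, 1) + 'a'
--                 x.append(vertex)
--             v.append(x)
--         for i in range(1, k):
--             address_s = []
--             for j in range(n):
--                 u = []
--                 for a in range(n):
--                     for b in range(n * (n ** (i - 1))):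
--                         vertex = ten2x(j, n, 1) + v[a][b]
--                         u.append(vertex)
--                 address_s.append(u)
--             v = address_s.copy()
--
--         return address_s
-- ===== SOURCE B (Python) =====
-- def servers(n, k):
--     a = ['0','1','2','3','4','5','6','7','8','9','A','B','C','D','E','F','G','H','I','J','K','L','M','N','O','P','Q','R','S','T','U','V']
--     suffixes = ['']
--     for _ in range(k):
--         suffixes = [s + a[d] for s in suffixes for d in range(n)]
--     return [[a[i] + s + 'a' for s in suffixes] for i in range(n)]
-- ===== Notes on version B (the rewrite author's own statement) =====
-- stated objective: simpler
-- what changed: B replaces A's hand-rolled base conversion and layer-by-layer list rebuilding (copying the whole previous level and re-indexing it with v[a][b]) by directly growing the list of digit suffixes one digit per level and emitting each row as a single comprehension.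
import Mathlib
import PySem

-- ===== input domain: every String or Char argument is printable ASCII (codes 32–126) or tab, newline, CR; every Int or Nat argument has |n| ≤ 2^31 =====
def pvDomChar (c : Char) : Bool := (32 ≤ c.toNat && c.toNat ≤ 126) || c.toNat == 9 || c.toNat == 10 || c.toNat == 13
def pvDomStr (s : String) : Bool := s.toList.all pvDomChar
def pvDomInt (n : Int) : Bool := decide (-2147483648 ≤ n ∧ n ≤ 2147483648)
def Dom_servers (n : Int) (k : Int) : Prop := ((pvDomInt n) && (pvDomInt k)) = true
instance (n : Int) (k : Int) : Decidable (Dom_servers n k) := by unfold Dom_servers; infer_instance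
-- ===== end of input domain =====

-- B builds each address row by growing the list of digit suffixes one digit per level,
-- instead of A's per-level rebuild that re-indexes the whole previous level (objective: simpler).


-- the 32-entry digit table `a` both Pythons write out literally
def pyDigits : List Char :=
  ['0','1','2','3','4','5','6','7','8','9','A','B','C','D','E','F','G','H','I','J','K','L','M','N','O','P','Q','R','S','T','U','V']

-- ===== PORT A =====
-- ten2x's `while True` loop; the fuel only makes it total (inside Pre_ the loop body runs once and breaks)
def ten2xLoop : Nat → Int → Int → List Int → List Int
  | 0, _, _, b => b
  | fuel+1, n, x, b =>
      let s := PySem.Int.floordiv n x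
      let y := PySem.Int.mod n x
      let b' := b ++ [y]
      if s = 0 then b' else ten2xLoop fuel s x b'

def ten2x (n : Int) (x : Int) (l : Int) : String :=
  let b := ten2xLoop 64 n x []
  -- a[i]: exact for 0 ≤ i < 32 (other indices raise IndexError in Python — excluded by Pre_)
  let nt := b.foldl (fun acc i => acc ++ [(PySem.List.pyGet? pyDigits i).getD '0']) []
  let nt := (PySem.List.pyRange 0 (l - nt.length) 1).foldl (fun acc _ => acc ++ ['0']) nt
  String.mk nt.reverse

def servers (n : Int) (k : Int) : List (List String) :=
  if k = 1 then
    (PySem.List.pyRange 0 n 1).foldl (fun address_s i =>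
      address_s ++ [(PySem.List.pyRange 0 n 1).foldl (fun v j =>
        v ++ [ten2x i n 1 ++ ten2x j n 1 ++ "a"]) []]) []
  else
    let v0 := (PySem.List.pyRange 0 n 1).foldl (fun v i =>
      v ++ [(PySem.List.pyRange 0 n 1).foldl (fun x j =>
        x ++ [ten2x i n 1 ++ ten2x j n 1 ++ "a"]) []]) []
    -- n ** (i-1): i ≥ 1 inside range(1,k), so the Nat exponent (i-1).toNat is exact;
    -- v[a][b]: in range inside Pre_, so pyGetD's defaults are never taken
    (PySem.List.pyRange 1 k 1).foldl (fun v i =>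
      (PySem.List.pyRange 0 n 1).foldl (fun address_s j =>
        address_s ++ [(PySem.List.pyRange 0 n 1).foldl (fun u a =>
          (PySem.List.pyRange 0 (n * n ^ (i-1).toNat) 1).foldl (fun u b =>
            u ++ [ten2x j n 1 ++ PySem.List.pyGetD (PySem.List.pyGetD v a []) b ""]) u) []]) []) v0

-- ===== PORT B =====
-- B's a[d] as a one-character string: exact for 0 ≤ d < 32 (Pre_)
def altDig (d : Int) : String := String.mk [(PySem.List.pyGet? pyDigits d).getD '0']

def servers_alt (n : Int) (k : Int) : List (List String) :=
  let suffixes := (PySem.List.pyRange 0 k 1).foldl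
      (fun ss _ => ss.flatMap (fun s => (PySem.List.pyRange 0 n 1).map (fun d => s ++ altDig d))) [""]
  (PySem.List.pyRange 0 n 1).map (fun i => suffixes.map (fun s => altDig i ++ s ++ "a"))

-- ===== PRECONDITION & SPEC =====
-- A returns normally exactly when k ≥ 1 (else address_s is unbound → UnboundLocalError)
-- and n ≤ 32 (else the 32-entry table is over-indexed → IndexError).
def Pre_servers (n : Int) (k : Int) : Prop := 1 ≤ k ∧ n ≤ 32
instance (n : Int) (k : Int) : Decidable (Pre_servers n k) := by unfold Pre_servers; infer_instance
def pvWitness_servers : Int × Int := (3, 2)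


def Spec_servers (n : Int) (k : Int) (out : List (List String)) : Prop := out = servers_alt n k
instance (n : Int) (k : Int) (out : List (List String)) : Decidable (Spec_servers n k out) := by unfold Spec_servers; infer_instance

-- ===== CLAIM (what is proved, stated in full; the proofs are below) =====
def Claim_equal_servers : Prop := ∀ (n : Int) (k : Int), Dom_servers n k → Pre_servers n k → Spec_servers n k (servers n k)


-- ===== LEMMAS AND PROOFS =====

-- within Pre_ every ten2x call is ten2x i n 1 with 0 ≤ i < n ≤ 32, which equals B's one-char digit
theorem ten2x_eq_altDig (i n : Int) (h0 : 0 ≤ i) (h1 : i < n) : ten2x i n 1 = altDig i := by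
  have hn : 0 < n := lt_of_le_of_lt h0 h1
  have hdiv : PySem.Int.floordiv i n = 0 := by
    rw [PySem.Int.floordiv_eq_ediv_of_pos hn]; exact Int.ediv_eq_zero_of_lt h0 h1
  have hmod : PySem.Int.mod i n = i := by
    rw [PySem.Int.mod_eq_emod_of_pos hn]; exact Int.emod_eq_of_lt h0 h1
  simp [ten2x, ten2xLoop, hdiv, hmod, PySem.List.pyRange_one_eq_nil, altDig]

-- the list of all m-digit suffixes in lexicographic order (B grows it digit by digit on the right)
def sfx (n : Int) : Nat → List String
  | 0 => [""]
  | m+1 => (sfx n m).flatMap (fun s => (PySem.List.pyRange 0 n 1).map (fun d => s ++ altDig d))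

theorem foldl_ignore_iterate {α β : Type} (g : α → α) (l : List β) (x : α) :
    l.foldl (fun a _ => g a) x = g^[l.length] x := by
  induction l generalizing x with
  | nil => rfl
  | cons h t ih => simp [List.foldl_cons, ih, Function.iterate_succ_apply]

theorem alt_suffixes (n k : Int) :
    (PySem.List.pyRange 0 k 1).foldl
      (fun ss _ => ss.flatMap (fun s => (PySem.List.pyRange 0 n 1).map (fun d => s ++ altDig d))) [""]
    = sfx n k.toNat := by
  rw [foldl_ignore_iterate, PySem.List.length_pyRange_one]
  have h : (k - 0).toNat = k.toNat := by omega
  rw [h]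
  induction k.toNat with
  | zero => rfl
  | succ m ih => rw [Function.iterate_succ_apply', ih]; rfl

-- the same suffix list grown digit by digit on the LEFT (the shape of A's level step)
theorem sfx_left (n : Int) (m : Nat) :
    sfx n (m+1) = (PySem.List.pyRange 0 n 1).flatMap (fun a => (sfx n m).map (fun s => altDig a ++ s)) := by
  induction m with
  | zero =>
      simp only [sfx, List.flatMap_cons, List.flatMap_nil, List.append_nil]
      simp [← List.map_eq_flatMap]
  | succ m ih =>
      conv_lhs => rw [show sfx n (m+1+1) = (sfx n (m+1)).flatMap
        (fun s => (PySem.List.pyRange 0 n 1).map (fun d => s ++ altDig d)) from rfl, ih]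
      conv_rhs => rw [show sfx n (m+1) = (sfx n m).flatMap
        (fun s => (PySem.List.pyRange 0 n 1).map (fun d => s ++ altDig d)) from rfl]
      simp [List.flatMap_assoc, List.flatMap_map, List.map_flatMap, List.map_map,
        Function.comp_def, String.append_assoc]

theorem len_sfx (n : Int) (m : Nat) : (sfx n m).length = n.toNat ^ m := by
  induction m with
  | zero => simp [sfx]
  | succ m ih => simp [sfx, List.length_flatMap, ih, pow_succ]

-- the level reached after processing loop indices 1..m (one row per leading digit,
-- each row: all m-digit suffixes, then the trailing "a")
def level (n : Int) (m : Nat) : List (List String) :=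
  (PySem.List.pyRange 0 n 1).map (fun j => (sfx n m).map (fun s => altDig j ++ s ++ "a"))

theorem bodyA_eq (n i : Int) (hi : 1 ≤ i) :
    ((PySem.List.pyRange 0 n 1).foldl (fun address_s j =>
        address_s ++ [(PySem.List.pyRange 0 n 1).foldl (fun u a =>
          (PySem.List.pyRange 0 (n * n ^ (i-1).toNat) 1).foldl (fun u b =>
            u ++ [ten2x j n 1 ++ PySem.List.pyGetD (PySem.List.pyGetD (level n i.toNat) a []) b ""]) u) []]) [])
    = level n (i.toNat + 1) := by
  have hlev : ∀ a : Int, 0 ≤ a → a < n →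
      PySem.List.pyGetD (level n i.toNat) a [] = (sfx n i.toNat).map (fun s => altDig a ++ s ++ "a") := by
    intro a ha0 han
    unfold level
    exact PySem.List.pyGetD_map_pyRange_of_nonneg _ n a [] ha0 han
  rw [PySem.List.foldl_append_singleton_eq_map, List.nil_append]
  conv_rhs => unfold level
  apply List.map_eq_map_iff.mpr
  intro j hj
  obtain ⟨hj0, hjn⟩ := PySem.List.mem_pyRange_one.mp hj
  have hbf : (fun (u : List String) (a : Int) =>
        (PySem.List.pyRange 0 (n * n ^ (i-1).toNat) 1).foldl (fun u b =>
          u ++ [ten2x j n 1 ++ PySem.List.pyGetD (PySem.List.pyGetD (level n i.toNat) a []) b ""]) u)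
      = fun u a => u ++ ((PySem.List.pyRange 0 (n * n ^ (i-1).toNat) 1).map (fun b =>
          ten2x j n 1 ++ PySem.List.pyGetD (PySem.List.pyGetD (level n i.toNat) a []) b "")) := by
    funext u a
    rw [PySem.List.foldl_append_singleton_eq_map]
  rw [hbf, PySem.List.foldl_append_eq_flatMap, List.nil_append]
  rw [sfx_left, List.map_flatMap]
  apply List.flatMap_congr
  intro a ha
  obtain ⟨ha0, han⟩ := PySem.List.mem_pyRange_one.mp ha
  rw [hlev a ha0 han]
  have hlen : n * n ^ (i-1).toNat
      = (((sfx n i.toNat).map (fun s => altDig a ++ s ++ "a")).length : Int) := by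
    rw [List.length_map, len_sfx]
    have h1 : i.toNat = (i-1).toNat + 1 := by omega
    rw [h1, pow_succ]
    push_cast
    have h2 : ((n.toNat : Int)) = n := by omega
    rw [h2]; ring
  rw [hlen]
  rw [show (fun b => ten2x j n 1 ++ PySem.List.pyGetD ((sfx n i.toNat).map
        (fun s => altDig a ++ s ++ "a")) b "")
      = ((fun r => ten2x j n 1 ++ r) ∘ (fun b => PySem.List.pyGetD ((sfx n i.toNat).map
        (fun s => altDig a ++ s ++ "a")) b "")) from rfl, ← List.map_map]
  rw [PySem.List.map_pyGetD_pyRange_zero']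
  simp [List.map_map, Function.comp_def, String.append_assoc, ten2x_eq_altDig j n hj0 hjn]

theorem loopA (n : Int) : ∀ (c : Nat) (i : Int), 1 ≤ i →
    (PySem.List.pyRange i (i + c) 1).foldl (fun v i =>
      (PySem.List.pyRange 0 n 1).foldl (fun address_s j =>
        address_s ++ [(PySem.List.pyRange 0 n 1).foldl (fun u a =>
          (PySem.List.pyRange 0 (n * n ^ (i-1).toNat) 1).foldl (fun u b =>
            u ++ [ten2x j n 1 ++ PySem.List.pyGetD (PySem.List.pyGetD v a []) b ""]) u) []]) []) (level n i.toNat)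
    = level n (i.toNat + c) := by
  intro c
  induction c with
  | zero => intro i hi; simp [PySem.List.pyRange_one_eq_nil]
  | succ c ih =>
      intro i hi
      rw [PySem.List.pyRange_one_cons (by omega : i < i + ((c:Nat)+1 : Nat)), List.foldl_cons]
      have hb := bodyA_eq n i hi
      simp only [] at hb ⊢
      rw [hb]
      have h1 : (i + 1).toNat = i.toNat + 1 := by omega
      have h2 := ih (i+1) (by omega)
      rw [h1] at h2
      rw [show i + ((c:Nat)+1 : Nat) = (i+1) + (c:Nat) by push_cast; ring]
      rw [h2]
      congr 1
      omega

-- the initial BCube(n,1) level built by both of A's branches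
theorem base_level (n : Int) :
    ((PySem.List.pyRange 0 n 1).foldl (fun v i =>
      v ++ [(PySem.List.pyRange 0 n 1).foldl (fun x j =>
        x ++ [ten2x i n 1 ++ ten2x j n 1 ++ "a"]) []]) [])
    = level n 1 := by
  rw [PySem.List.foldl_append_singleton_eq_map, List.nil_append]
  unfold level
  apply List.map_eq_map_iff.mpr
  intro i hi
  obtain ⟨hi0, hin⟩ := (PySem.List.mem_pyRange_one).mp hi
  rw [PySem.List.foldl_append_singleton_eq_map, List.nil_append]
  rw [show sfx n 1 = [""].flatMap (fun s => (PySem.List.pyRange 0 n 1).map (fun d => s ++ altDig d)) from rfl]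
  simp only [List.flatMap_cons, List.flatMap_nil, List.append_nil, List.map_map]
  apply List.map_eq_map_iff.mpr
  intro j hj
  obtain ⟨hj0, hjn⟩ := (PySem.List.mem_pyRange_one).mp hj
  simp [ten2x_eq_altDig i n hi0 hin, ten2x_eq_altDig j n hj0 hjn]

theorem foldl_nil_body {α : Type} (l : List α)
    (f : List (List String) → α → List (List String)) (h : ∀ x, f [] x = []) :
    l.foldl f [] = [] := by
  induction l with
  | nil => rfl
  | cons x t ih => rw [List.foldl_cons, h x]; exact ih

-- ===== VERDICT (by name: the statement is the Claim_ definition above) =====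
theorem servers_spec : Claim_equal_servers := by
  intro n k _ hpre
  obtain ⟨hk, h32⟩ := hpre
  unfold Spec_servers servers servers_alt
  simp only []
  rw [alt_suffixes]
  by_cases hn : 0 < n
  · by_cases hk1 : k = 1
    · subst hk1
      rw [base_level n]
      rfl
    · rw [if_neg hk1]
      have hbase := base_level n
      rw [hbase]
      have hsplit : PySem.List.pyRange 1 k 1 = PySem.List.pyRange 1 (1 + ((k-1).toNat : Nat)) 1 := by
        congr 1; omega
      rw [hsplit]
      have hl := loopA n (k-1).toNat 1 (by omega)
      rw [show ((1:Int)).toNat = 1 from rfl] at hl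
      have hkk : 1 + (k-1).toNat = k.toNat := by omega
      rw [hkk] at hl
      rw [hl]
      rfl
  · -- n ≤ 0: both sides are empty
    have hr : PySem.List.pyRange 0 n 1 = [] := PySem.List.pyRange_one_eq_nil (by omega)
    by_cases hk1 : k = 1
    · subst hk1; simp [hr]
    · rw [if_neg hk1]
      simp only [hr, List.foldl_nil, List.map_nil]
      exact foldl_nil_body _ _ (fun x => by simp)
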